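-- pv_equiv track=rewrite | github.com/therealharish/Problem-Solving | Hackerearth/Hackerrank/Jim and the Orders.py | jimOrders
-- ===== SOURCE A (Python) =====
-- from collections import OrderedDict
--
-- def jimOrders(orders):
--   d={}
--   ans=[]
--   count=1
--   for i in range(len(orders)):
--     serve = orders[i][0] + orders[i][1]
--     if(serve in d):
--       d[serve].append(count)
--       count+=1
--     else:
--       d[serve]=[count]
--       count+=1
--
--   dict = OrderedDict(sorted(d.items()))
--   for x,y in dict.items():
--     if(len(y)==1):
--       ans.append(y[0])
--     else:
--       for i in y:
--         ans.append(i)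
--   return ans
-- ===== SOURCE B (Python) =====
-- def jimOrders(orders):
--     # One pass builds flat (serve, arrival) pairs; a single stable sort by serve
--     # keeps arrival order on ties (pairs are generated in arrival order).
--     pairs = [(o[0] + o[1], i) for i, o in enumerate(orders, 1)]
--     pairs.sort(key=lambda p: p[0])
--     return [i for _, i in pairs]
-- ===== Notes on version B (the rewrite author's own statement) =====
-- stated objective: simpler
-- what changed: Replaces A's dict-of-buckets grouping followed by a key-sort and a flattening loop with one flat list of (serve,arrival) pairs and a single stable sort by serve time.
import Mathlib
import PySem

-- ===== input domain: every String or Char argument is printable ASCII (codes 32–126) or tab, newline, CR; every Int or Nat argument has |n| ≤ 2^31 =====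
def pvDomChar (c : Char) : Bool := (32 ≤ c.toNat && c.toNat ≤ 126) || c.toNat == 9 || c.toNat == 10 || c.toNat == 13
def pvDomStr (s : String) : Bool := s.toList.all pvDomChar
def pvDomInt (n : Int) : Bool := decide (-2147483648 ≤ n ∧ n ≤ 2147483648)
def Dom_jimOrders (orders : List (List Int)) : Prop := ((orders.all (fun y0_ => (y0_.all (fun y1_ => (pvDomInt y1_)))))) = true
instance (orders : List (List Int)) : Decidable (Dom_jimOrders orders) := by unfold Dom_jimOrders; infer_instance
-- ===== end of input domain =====

-- B replaces A's dict-of-buckets grouping + key-sort + flatten with a flat (serve, arrival)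
-- pair list and one stable sort by serve time; same return values, similar cost (objective: simpler).

-- ===== PORT A =====
-- loop body of A's first for-loop: one step of the dict-building fold
-- (state = (d, count); row = orders[i]; 'serve in d' tested via get?)
def jimStep (st : PySem.Dict Int (List Int) × Int) (row : List Int) :
    PySem.Dict Int (List Int) × Int :=
  let serve := PySem.List.pyGetD row 0 0 + PySem.List.pyGetD row 1 0
  match st.1.get? serve with
  | some ys => (st.1.insert serve (ys ++ [st.2]), st.2 + 1)
  | none    => (st.1.insert serve [st.2], st.2 + 1)

def jimOrders (orders : List (List Int)) : List Int :=
  -- for i in range(len(orders)): … (indexing with orders[i]; in range under Pre_)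
  let fin := (PySem.List.pyRange 0 (PySem.List.len orders)).foldl
      (fun st i => jimStep st (PySem.List.pyGetD orders i [])) (PySem.Dict.empty, 1)
  -- sorted(d.items()): dict keys are distinct, so Python's tuple comparison is decided
  -- by the key alone — ported as a sort keyed on the first component
  let sortedItems := PySem.List.sorted fin.1.items Prod.fst
  -- final loop: len-1 buckets appended via y[0], larger buckets element by element
  sortedItems.foldl
    (fun ans xy =>
      if xy.2.length == 1 then ans ++ [PySem.List.pyGetD xy.2 0 0]
      else xy.2.foldl (fun a i => a ++ [i]) ans)
    []

-- ===== PORT B =====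
def jimOrders_alt (orders : List (List Int)) : List Int :=
  -- pairs = [(o[0] + o[1], i) for i, o in enumerate(orders, 1)]
  let pairs := (PySem.List.enumerate orders 1).map
      (fun io => (PySem.List.pyGetD io.2 0 0 + PySem.List.pyGetD io.2 1 0, io.1))
  -- pairs.sort(key=lambda p: p[0]); return [i for _, i in pairs]
  (PySem.List.sorted pairs Prod.fst).map Prod.snd

-- ===== PRECONDITION & SPEC =====
-- Pre_ excludes inputs with a row of fewer than two entries: there Python A (and B alike)
-- raises IndexError on orders[i][1].
def Pre_jimOrders (orders : List (List Int)) : Prop := ∀ o ∈ orders, 2 ≤ o.length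
instance (orders : List (List Int)) : Decidable (Pre_jimOrders orders) := by
  unfold Pre_jimOrders; infer_instance
def pvWitness_jimOrders : List (List Int) := [[3, 1], [4, 2], [3, 0]]

def Spec_jimOrders (orders : List (List Int)) (out : List Int) : Prop := out = jimOrders_alt orders
instance (orders : List (List Int)) (out : List Int) : Decidable (Spec_jimOrders orders out) := by
  unfold Spec_jimOrders; infer_instance

-- ===== CLAIM (what is proved, stated in full; the proofs are below) =====
def Claim_equal_jimOrders : Prop := ∀ (orders : List (List Int)), Dom_jimOrders orders → Pre_jimOrders orders → Spec_jimOrders orders (jimOrders orders)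

-- ===== LEMMAS AND PROOFS =====

-- serve time of a row, as both ports compute it
def pvServe (row : List Int) : Int := PySem.List.pyGetD row 0 0 + PySem.List.pyGetD row 1 0

-- the flat (serve, arrival) pair list, arrival counter starting at c
def pvPairs : List (List Int) → Int → List (Int × Int)
  | [], _ => []
  | o :: t, c => (pvServe o, c) :: pvPairs t (c + 1)

-- A's dict step, rewritten as a modify-append
def pvGrpStep (d : PySem.Dict Int (List Int)) (p : Int × Int) : PySem.Dict Int (List Int) :=
  d.modify p.1 [] (fun x => x ++ [p.2])

-- the distinct serve times in ascending order
def pvSortedKeys (ps : List (Int × Int)) : List Int :=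
  PySem.List.sorted (PySem.Set.ofList (ps.map Prod.fst)) id

-- insert a key into a sorted nodup key list
def pvAddKey (c : Int) (K : List Int) : List Int :=
  if c ∈ K then K else PySem.List.insertBy (fun a b => decide (a < b)) c K

theorem pv_jimStep_eq (st : PySem.Dict Int (List Int) × Int) (row : List Int) :
    jimStep st row = (pvGrpStep st.1 (pvServe row, st.2), st.2 + 1) := by
  unfold jimStep pvGrpStep pvServe PySem.Dict.modify
  cases h : st.1.get? (PySem.List.pyGetD row 0 0 + PySem.List.pyGetD row 1 0) with
  | some ys => simp [h, PySem.Dict.getD_of_get?_eq_some _ _ h]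
  | none => simp [h, PySem.Dict.getD_of_get?_eq_none _ _ h]

theorem pv_foldl_jimStep (orders : List (List Int)) :
    ∀ (d : PySem.Dict Int (List Int)) (c : Int),
      orders.foldl jimStep (d, c) =
        ((pvPairs orders c).foldl pvGrpStep d, c + orders.length) := by
  induction orders with
  | nil => intro d c; simp [pvPairs]
  | cons o t ih =>
      intro d c
      simp only [List.foldl_cons, pv_jimStep_eq, pvPairs, List.length_cons]
      rw [ih]
      refine Prod.ext rfl ?_
      push_cast; ring

theorem pv_pairs_eq_enumerate (orders : List (List Int)) :
    ∀ c : Int, pvPairs orders c =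
      (PySem.List.enumerate orders c).map (fun io => (pvServe io.2, io.1)) := by
  induction orders with
  | nil => intro c; simp [pvPairs, PySem.List.enumerate]
  | cons o t ih =>
      intro c
      simp only [pvPairs, PySem.List.enumerate, List.map_cons]
      rw [ih (c + 1)]

theorem pv_getD_grp (ps : List (Int × Int)) (c : Int) :
    ((ps.foldl pvGrpStep PySem.Dict.empty).getD c []) =
      (ps.filter (fun p => p.1 == c)).map Prod.snd := by
  have h : pvGrpStep = (fun d p => PySem.Dict.modify d p.1 [] (fun x => x ++ [p.2])) := rfl
  rw [h]
  simpa [PySem.Dict.getD_empty] using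
    PySem.Dict.getD_foldl_modify_append ps PySem.Dict.empty c

theorem pv_keys_grp (ps : List (Int × Int)) :
    (ps.foldl pvGrpStep PySem.Dict.empty).keys = PySem.Set.ofList (ps.map Prod.fst) := by
  have h : pvGrpStep = (fun d (p : Int × Int) =>
      PySem.Dict.modify d p.1 [] ((fun (_ : PySem.Dict Int (List Int)) (p : Int × Int) => (fun x => x ++ [p.2])) d p)) := rfl
  rw [h, PySem.Dict.keys_foldl_modify_key]
  simp [PySem.Dict.keys_empty, PySem.Set.update, PySem.Set.ofList, PySem.Set.empty]

theorem pv_items_grp (ps : List (Int × Int)) :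
    (ps.foldl pvGrpStep PySem.Dict.empty).items =
      (PySem.Set.ofList (ps.map Prod.fst)).map
        (fun k => (k, (ps.filter (fun p => p.1 == k)).map Prod.snd)) := by
  have hn : (ps.foldl pvGrpStep PySem.Dict.empty).keys.Nodup := by
    rw [pv_keys_grp]; exact PySem.Set.nodup_ofList _
  rw [PySem.Dict.items_eq_map_keys _ hn [], pv_keys_grp]
  exact List.map_congr_left (fun k _ => by rw [pv_getD_grp])

theorem pv_sortedKeys_nodup (ps : List (Int × Int)) : (pvSortedKeys ps).Nodup := by
  exact ((PySem.List.sorted_perm _ _ _).nodup_iff).mpr (PySem.Set.nodup_ofList _)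

theorem pv_sortedKeys_lt (ps : List (Int × Int)) : (pvSortedKeys ps).Pairwise (· < ·) := by
  have h1 := PySem.List.sorted_pairwise (PySem.Set.ofList (ps.map Prod.fst)) id
  have h2 : (pvSortedKeys ps).Pairwise (· ≠ ·) := pv_sortedKeys_nodup ps
  exact (h1.and h2).imp (fun h => lt_of_le_of_ne h.1 h.2)

theorem pv_mem_sortedKeys (ps : List (Int × Int)) (k : Int) :
    k ∈ pvSortedKeys ps ↔ k ∈ ps.map Prod.fst := by
  exact ((PySem.List.sorted_perm _ _ _).mem_iff).trans (PySem.Set.mem_ofList _ _)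

-- sorted items of the group dict, through the unique sorted nodup enumeration
theorem pv_sorted_items (ps : List (Int × Int)) :
    PySem.List.sorted ((ps.foldl pvGrpStep PySem.Dict.empty).items) Prod.fst =
      (pvSortedKeys ps).map
        (fun k => (k, (ps.filter (fun p => p.1 == k)).map Prod.snd)) := by
  rw [pv_items_grp]
  refine PySem.List.sorted_eq_of_perm_of_pairwise_lt _ _ Prod.fst
    ((PySem.List.sorted_perm _ _ _).map _) ?_
  exact (List.pairwise_map).mpr (pv_sortedKeys_lt ps)

-- generic insertBy facts
theorem pv_insertBy_append {α : Type} (bf : α → α → Bool) (p : α) (A B : List α)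
    (h : ∀ x ∈ A, bf p x = false) :
    PySem.List.insertBy bf p (A ++ B) = A ++ PySem.List.insertBy bf p B := by
  induction A with
  | nil => simp
  | cons y A ih =>
      simp only [List.cons_append, PySem.List.insertBy, h y (by simp)]
      simp only [Bool.false_eq_true, if_false, List.cons.injEq, true_and]
      exact ih (fun x hx => h x (by simp [hx]))

theorem pv_insertBy_front {α : Type} (bf : α → α → Bool) (p : α) (L : List α)
    (h : ∀ x ∈ L, bf p x = true) :
    PySem.List.insertBy bf p L = p :: L := by
  cases L with
  | nil => simp [PySem.List.insertBy]
  | cons y ys => simp [PySem.List.insertBy, h y (by simp)]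

-- inserting a pair into a grouped-by-ascending-key flat list
theorem pv_insert_grouped (p : Int × Int) :
    ∀ (K : List Int) (g : Int → List (Int × Int)),
      K.Pairwise (· < ·) →
      (∀ k ∈ K, ∀ q ∈ g k, q.1 = k) →
      (p.1 ∉ K → g p.1 = []) →
      PySem.List.insertBy (fun a b => decide (a.1 < b.1)) p (K.flatMap g) =
        (pvAddKey p.1 K).flatMap (fun k => if k = p.1 then g k ++ [p] else g k) := by
  intro K
  induction K with
  | nil =>
      intro g _ _ hnew
      simp [PySem.List.insertBy, pvAddKey, hnew (by simp)]
  | cons k K2 ih =>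
      intro g hK hg hnew
      have hK2lt : ∀ k' ∈ K2, k < k' := (List.pairwise_cons.mp hK).1
      rcases lt_trichotomy p.1 k with hlt | heq | hgt
      · -- p.1 < k : p goes to the very front, key p.1 is new
        have hnotmem : p.1 ∉ k :: K2 := by
          intro hm
          rcases List.mem_cons.mp hm with h1 | h2
          · omega
          · have := hK2lt _ h2; omega
        have hall : ∀ q ∈ (k :: K2).flatMap g, (fun a b : Int × Int => decide (a.1 < b.1)) p q = true := by
          intro q hq
          rcases List.mem_flatMap.mp hq with ⟨k', hk', hq'⟩
          have hqk : q.1 = k' := hg k' hk' q hq'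
          have : k ≤ k' := by
            rcases List.mem_cons.mp hk' with h1 | h2
            · omega
            · have := hK2lt _ h2; omega
          simp only [decide_eq_true_eq]; omega
        rw [pv_insertBy_front _ _ _ hall]
        have haddk : pvAddKey p.1 (k :: K2) = p.1 :: k :: K2 := by
          rw [pvAddKey, if_neg hnotmem]
          simp [PySem.List.insertBy, hlt]
        rw [haddk]
        have hrest : ∀ k' ∈ k :: K2, (if k' = p.1 then g k' ++ [p] else g k') = g k' := by
          intro k' hk'
          rw [if_neg]; intro h; exact hnotmem (h ▸ hk')
        conv_rhs => rw [List.flatMap_cons, List.flatMap_congr hrest]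
        simp [hnew hnotmem]
      · -- p.1 = k : p appended at the end of bucket k
        have hA : ∀ x ∈ g k, (fun a b : Int × Int => decide (a.1 < b.1)) p x = false := by
          intro x hx
          have := hg k (by simp) x hx
          simp only [decide_eq_false_iff_not]; omega
        have hB : ∀ x ∈ K2.flatMap g, (fun a b : Int × Int => decide (a.1 < b.1)) p x = true := by
          intro x hx
          rcases List.mem_flatMap.mp hx with ⟨k', hk', hx'⟩
          have := hg k' (by simp [hk']) x hx'
          have := hK2lt _ hk'
          simp only [decide_eq_true_eq]; omega
        rw [List.flatMap_cons, pv_insertBy_append _ _ _ _ hA, pv_insertBy_front _ _ _ hB]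
        have haddk : pvAddKey p.1 (k :: K2) = k :: K2 := by
          rw [pvAddKey, if_pos (by simp [heq])]
        rw [haddk, List.flatMap_cons, if_pos heq.symm]
        have hrest : ∀ k' ∈ K2, (if k' = p.1 then g k' ++ [p] else g k') = g k' := by
          intro k' hk'
          have := hK2lt _ hk'
          rw [if_neg]; omega
        rw [List.flatMap_congr hrest]
        simp
      · -- k < p.1 : skip bucket k, recurse
        have hA : ∀ x ∈ g k, (fun a b : Int × Int => decide (a.1 < b.1)) p x = false := by
          intro x hx
          have := hg k (by simp) x hx
          simp only [decide_eq_false_iff_not]; omega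
        have hnew2 : p.1 ∉ K2 → g p.1 = [] := by
          intro h2; exact hnew (by simp [h2]; omega)
        rw [List.flatMap_cons, pv_insertBy_append _ _ _ _ hA,
            ih g (List.pairwise_cons.mp hK).2 (fun k' hk' => hg k' (by simp [hk'])) hnew2]
        have haddk : pvAddKey p.1 (k :: K2) = k :: pvAddKey p.1 K2 := by
          by_cases hm : p.1 ∈ K2
          · rw [pvAddKey, if_pos (by simp [hm]), pvAddKey, if_pos hm]
          · have : p.1 ∉ k :: K2 := by simp [hm]; omega
            rw [pvAddKey, if_neg this, pvAddKey, if_neg hm]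
            simp only [PySem.List.insertBy]
            rw [if_neg (by simp; omega)]
        rw [haddk, List.flatMap_cons]
        rw [if_neg (by omega)]


theorem pv_sorted_append_singleton {α κ : Type} [LinearOrder κ]
    (xs : List α) (x : α) (key : α → κ) :
    PySem.List.sorted (xs ++ [x]) key =
      PySem.List.insertBy (fun a b => decide (key a < key b)) x (PySem.List.sorted xs key) := by
  simp [PySem.List.sorted, List.foldl_append]

theorem pv_sortedKeys_append (ps : List (Int × Int)) (p : Int × Int) :
    pvSortedKeys (ps ++ [p]) = pvAddKey p.1 (pvSortedKeys ps) := by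
  unfold pvSortedKeys pvAddKey
  have h1 : (ps ++ [p]).map Prod.fst = ps.map Prod.fst ++ [p.1] := by simp
  rw [h1]
  have hof : PySem.Set.ofList (ps.map Prod.fst ++ [p.1]) =
      PySem.Set.add (PySem.Set.ofList (ps.map Prod.fst)) p.1 := by
    simp [PySem.Set.ofList, List.foldl_append]
  rw [hof]
  by_cases hm : p.1 ∈ PySem.List.sorted (PySem.Set.ofList (ps.map Prod.fst)) id
  · rw [if_pos hm]
    have hmem : p.1 ∈ PySem.Set.ofList (ps.map Prod.fst) :=
      (PySem.List.sorted_perm _ _ _).mem_iff.mp hm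
    have : PySem.Set.add (PySem.Set.ofList (ps.map Prod.fst)) p.1
        = PySem.Set.ofList (ps.map Prod.fst) := by
      simp [PySem.Set.add, PySem.Set.contains, hmem]
    rw [this]
  · rw [if_neg hm]
    have hmem : p.1 ∉ PySem.Set.ofList (ps.map Prod.fst) :=
      fun h => hm ((PySem.List.sorted_perm _ _ _).mem_iff.mpr h)
    have : PySem.Set.add (PySem.Set.ofList (ps.map Prod.fst)) p.1
        = PySem.Set.ofList (ps.map Prod.fst) ++ [p.1] := by
      simp [PySem.Set.add, PySem.Set.contains, hmem]
    rw [this, pv_sorted_append_singleton]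
    rfl


-- STABILITY: the stable sort by first component, as grouped filters over ascending keys
theorem pv_sorted_grouped (ps : List (Int × Int)) :
    PySem.List.sorted ps Prod.fst =
      (pvSortedKeys ps).flatMap (fun k => ps.filter (fun q => q.1 == k)) := by
  induction ps using List.reverseRecOn with
  | nil => simp [pvSortedKeys, PySem.List.sorted, PySem.Set.ofList]
  | append_singleton ps p ih =>
      rw [pv_sorted_append_singleton, ih, pv_sortedKeys_append]
      have hg : ∀ k ∈ pvSortedKeys ps, ∀ q ∈ ps.filter (fun q => q.1 == k), q.1 = k := by
        intro k _ q hq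
        exact eq_of_beq (List.mem_filter.mp hq).2
      have hnew : p.1 ∉ pvSortedKeys ps → ps.filter (fun q => q.1 == p.1) = [] := by
        intro hm
        rw [List.filter_eq_nil_iff]
        intro q hq hb
        exact hm ((pv_mem_sortedKeys ps p.1).mpr
          (List.mem_map.mpr ⟨q, hq, eq_of_beq hb⟩))
      rw [pv_insert_grouped p (pvSortedKeys ps) _ (pv_sortedKeys_lt ps) hg hnew]
      refine List.flatMap_congr ?_
      intro k _
      by_cases hk : k = p.1
      · subst hk
        simp [List.filter_append]
      · rw [if_neg hk]
        have : (p.1 == k) = false := by simp [Ne.symm hk]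
        simp [List.filter_append, this]

-- A's final loop flattens the sorted buckets
theorem pv_final_loop (L : List (Int × List Int)) :
    L.foldl
      (fun ans xy =>
        if xy.2.length == 1 then ans ++ [PySem.List.pyGetD xy.2 0 0]
        else xy.2.foldl (fun a i => a ++ [i]) ans)
      [] = L.flatMap Prod.snd := by
  suffices h : ∀ init : List Int, L.foldl
      (fun ans xy =>
        if xy.2.length == 1 then ans ++ [PySem.List.pyGetD xy.2 0 0]
        else xy.2.foldl (fun a i => a ++ [i]) ans)
      init = init ++ L.flatMap Prod.snd by simpa using h []
  induction L with
  | nil => intro init; simp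
  | cons xy t ih =>
      intro init
      have hstep : (if xy.2.length == 1 then init ++ [PySem.List.pyGetD xy.2 0 0]
          else xy.2.foldl (fun a i => a ++ [i]) init) = init ++ xy.2 := by
        by_cases h1 : xy.2.length = 1
        · obtain ⟨a, ha⟩ := List.length_eq_one_iff.mp h1
          simp [ha, PySem.List.pyGetD, PySem.List.pyIdx?, PySem.List.pyGet?]
        · simp only [beq_iff_eq, h1, if_false]
          exact PySem.List.foldl_append_singleton _ _
      simp only [List.foldl_cons, hstep, ih, List.flatMap_cons, List.append_assoc]


-- ===== VERDICT (by name: the statement is the Claim_ definition above) =====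
theorem jimOrders_spec : Claim_equal_jimOrders := by
  intro orders _ _
  unfold Spec_jimOrders jimOrders jimOrders_alt
  rw [PySem.List.foldl_pyRange_pyGetD orders [] jimStep (PySem.Dict.empty, (1:Int)) (le_refl 0)]
  rw [show Int.toNat 0 = 0 from rfl, List.drop_zero, pv_foldl_jimStep orders PySem.Dict.empty 1]
  have hb : (PySem.List.enumerate orders 1).map
      (fun io => (PySem.List.pyGetD io.2 0 0 + PySem.List.pyGetD io.2 1 0, io.1)) =
      pvPairs orders 1 := by
    rw [pv_pairs_eq_enumerate orders 1]
    exact List.map_congr_left (fun io _ => by simp [pvServe])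
  rw [hb]
  dsimp only
  rw [pv_sorted_items, pv_final_loop, pv_sorted_grouped]
  simp [List.flatMap_map, List.map_flatMap]
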